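-- pv_equiv track=rewrite | github.com/pdubs34/DynamicOnline | Workspace/Workspace/CSE310/Assignment 4/Palindrome/palindrome.py | contiguousPalindromeLength
-- ===== SOURCE A (Python) =====
-- def contiguousPalindromeLength(string):
--     end = len(string) - 1
--     start = 0
--     while(start < end):
--         if(string[start] == string[end]):
--             start = start + 1
--             end = end - 1
--         else:
--             return 0
--     return len(string)
-- ===== SOURCE B (Python) =====
-- def contiguousPalindromeLength(string):
--     rev = string[::-1]
--     return len(string) if string == rev else 0
-- ===== Notes on version B (the rewrite author's own statement) =====
-- stated objective: simpler
-- what changed: Replaces the explicit two-pointer inward index walk with early exit by building the reversed string once and comparing it to the original in a single equality check.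
import Mathlib
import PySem

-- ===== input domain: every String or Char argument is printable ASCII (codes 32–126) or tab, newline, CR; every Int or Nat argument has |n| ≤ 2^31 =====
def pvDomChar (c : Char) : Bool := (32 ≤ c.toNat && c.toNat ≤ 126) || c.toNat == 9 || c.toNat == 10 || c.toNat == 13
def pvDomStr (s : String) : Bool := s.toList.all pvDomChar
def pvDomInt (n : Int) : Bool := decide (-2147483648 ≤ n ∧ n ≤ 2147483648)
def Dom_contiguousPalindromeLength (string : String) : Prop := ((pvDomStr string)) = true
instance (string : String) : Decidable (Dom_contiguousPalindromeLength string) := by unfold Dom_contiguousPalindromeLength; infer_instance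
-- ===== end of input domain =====

-- B replaces A's two-pointer inward index walk by building the reversed string once
-- and comparing it to the original (objective: simpler; return value only, no mutation).


-- ===== PORT A =====
-- A's while loop: walk start/end inward; early `return 0` ↦ false, fall-through
-- `return len(string)` ↦ true (mapped back to 0 / len at the call site below).
-- string[start] / string[end] are always in range when read (0 ≤ start < end ≤ len-1),
-- so `.getD ' '` is exact there.
def pvLoopA (cs : List Char) (start e : Int) : Bool :=
  if start < e then
    if (PySem.List.pyGet? cs start).getD ' ' = (PySem.List.pyGet? cs e).getD ' ' then
      pvLoopA cs (start + 1) (e - 1)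
    else false
  else true
termination_by (e - start).toNat
decreasing_by omega

def contiguousPalindromeLength (string : String) : Int :=
  if pvLoopA string.toList 0 ((string.toList.length : Int) - 1) then (string.toList.length : Int) else 0

-- ===== PORT B =====
-- Source B: rev = string[::-1] (the full reversed copy); len(string) if string == rev else 0
def contiguousPalindromeLength_alt (string : String) : Int :=
  let rev := string.toList.reverse
  if string.toList = rev then (string.toList.length : Int) else 0

-- ===== PRECONDITION & SPEC =====
def Spec_contiguousPalindromeLength (string : String) (out : Int) : Prop := out = contiguousPalindromeLength_alt string
instance (string : String) (out : Int) : Decidable (Spec_contiguousPalindromeLength string out) := by unfold Spec_contiguousPalindromeLength; infer_instance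

-- ===== CLAIM (what is proved, stated in full; the proofs are below) =====
def Claim_equal_contiguousPalindromeLength : Prop := ∀ (string : String), Dom_contiguousPalindromeLength string → Spec_contiguousPalindromeLength string (contiguousPalindromeLength string)

-- ===== LEMMAS AND PROOFS =====

-- interior access: index j+1 of a :: l ++ [b] reads l at j, for 0 ≤ j < l.length
theorem pvGet_shift (a b : Char) (l : List Char) (j : Int) (h0 : 0 ≤ j)
    (h1 : j ≤ (l.length : Int) - 1) :
    PySem.List.pyGet? (a :: (l ++ [b])) (j + 1) = PySem.List.pyGet? l j := by
  have hj : j = ((j.toNat : Nat) : Int) := by omega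
  have hlt : j.toNat < l.length := by omega
  rw [hj]
  have : ((j.toNat : Nat) : Int) + 1 = ((j.toNat + 1 : Nat) : Int) := by push_cast; ring
  rw [this, PySem.List.pyGet?_natCast, PySem.List.pyGet?_natCast]
  simp [List.getElem?_append_left, hlt]

-- the inward walk on a :: l ++ [b], restricted to interior indices, is the walk on l
theorem pvLoopA_shift (a b : Char) (l : List Char) :
    ∀ (n : Nat) (s e : Int), (e - s).toNat = n → 0 ≤ s → e ≤ (l.length : Int) - 1 →
    pvLoopA (a :: (l ++ [b])) (s + 1) (e + 1) = pvLoopA l s e := by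
  intro n
  induction n using Nat.strong_induction_on with
  | _ n ih =>
    intro s e hn hs he
    by_cases hlt : s < e
    · have h1 : s + 1 < e + 1 := by omega
      rw [pvLoopA, if_pos h1, pvGet_shift a b l s hs (by omega),
        pvGet_shift a b l e (by omega) he]
      conv_rhs => rw [pvLoopA, if_pos hlt]
      split
      · rw [show e + 1 - 1 = (e - 1) + 1 by ring]
        exact ih ((e - 1) - (s + 1)).toNat (by omega) (s + 1) (e - 1) rfl (by omega) (by omega)
      · rfl
    · rw [pvLoopA, if_neg (by omega : ¬ s + 1 < e + 1)]
      conv_rhs => rw [pvLoopA, if_neg hlt]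

theorem pvLoopA_pal (cs : List Char) :
    (pvLoopA cs 0 ((cs.length : Int) - 1) = true) ↔ cs.reverse = cs := by
  induction cs using List.bidirectionalRecOn with
  | H0 => simp [pvLoopA]
  | H1 a => simp [pvLoopA]
  | Hn a l b ih =>
    have hlen : (((a :: (l ++ [b])).length : Int) - 1) = (l.length : Int) + 1 := by
      simp
    rw [hlen, pvLoopA, if_pos (by omega : (0:Int) < (l.length : Int) + 1)]
    have hget0 : PySem.List.pyGet? (a :: (l ++ [b])) 0 = some a := by
      rw [show (0:Int) = ((0:Nat):Int) by rfl, PySem.List.pyGet?_natCast]; rfl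
    have hgetE : PySem.List.pyGet? (a :: (l ++ [b])) ((l.length : Int) + 1) = some b := by
      rw [show (l.length : Int) + 1 = ((l.length + 1 : Nat) : Int) by push_cast; ring,
        PySem.List.pyGet?_natCast]
      simp
    rw [hget0, hgetE]
    simp only [Option.getD_some]
    by_cases hab : a = b
    · rw [if_pos hab]
      have hs : pvLoopA (a :: (l ++ [b])) (0 + 1) (((l.length : Int) - 1) + 1)
          = pvLoopA l 0 ((l.length : Int) - 1) :=
        pvLoopA_shift a b l ((l.length : Int) - 1 - 0).toNat 0 ((l.length : Int) - 1) rfl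
          (by omega) (by omega)
      have : ((l.length : Int) - 1) + 1 = (l.length : Int) := by ring
      rw [this] at hs
      rw [show (0:Int) + 1 = 1 by ring] at hs
      rw [show ((l.length : Int) + 1 - 1) = (l.length : Int) by ring,
        show (0:Int) + 1 = 1 by ring, hs, ih]
      subst hab
      constructor
      · intro h; simp [List.reverse_append, h]
      · intro h
        have := congrArg List.reverse h
        simpa [List.reverse_append] using this.symm
    · rw [if_neg hab]
      constructor
      · intro h; exact absurd h (by simp)
      · intro h
        exfalso
        apply hab
        have : (a :: (l ++ [b])).reverse = b :: (l.reverse ++ [a]) := by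
          simp [List.reverse_append]
        rw [this] at h
        exact (List.cons.injEq _ _ _ _ ▸ h).1.symm

-- ===== VERDICT (by name: the statement is the Claim_ definition above) =====
theorem contiguousPalindromeLength_spec : Claim_equal_contiguousPalindromeLength := by
  intro s _
  unfold Spec_contiguousPalindromeLength contiguousPalindromeLength contiguousPalindromeLength_alt
  by_cases h : s.toList.reverse = s.toList
  · rw [if_pos ((pvLoopA_pal s.toList).mpr h), if_pos h.symm]
  · rw [if_neg (fun hh => h ((pvLoopA_pal s.toList).mp hh)), if_neg (fun hh => h hh.symm)]
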